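-- pv_equiv track=rewrite | github.com/InnerMobius/PorySuite-Z | ui/game_text_edit.py | inc_to_display
-- ===== SOURCE A (Python) =====
-- def inc_to_display(raw: str) -> tuple[str, list[str]]:
--     """
--     Convert raw .inc text content into human-friendly display text.
--
--     Returns (display_text, escape_map) where escape_map records which
--     escape sequence was used at each line break so we can restore them
--     on save (preserving \\p and \\l instead of converting everything to \\n).
--
--     - \\n, \\p, \\l  →  newlines (displayed as line breaks)
--     - $  →  stripped (it's just the terminator)
--     - {COMMANDS}  →  kept as-is (shown in blue via ExtraSelections)
--     """
--     text = raw
--     # Remove trailing $ terminator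
--     text = text.rstrip("$").rstrip()
--
--     # Record the escape sequences in order, then replace with newlines
--     escape_map: list[str] = []
--     result_parts: list[str] = []
--     i = 0
--     while i < len(text):
--         if text[i] == "\\" and i + 1 < len(text) and text[i + 1] in "npl":
--             esc = text[i:i + 2]  # \n, \p, or \l
--             escape_map.append(esc)
--             result_parts.append("\n")
--             i += 2
--         else:
--             result_parts.append(text[i])
--             i += 1
--
--     return "".join(result_parts), escape_map
-- ===== SOURCE B (Python) =====
-- def inc_to_display(raw: str) -> tuple[str, list[str]]:
--     text = raw.rstrip("$").rstrip()
--     # Split on backslash once, then fold over the parts: the first part is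
--     # literal; each later part followed a backslash, so it either starts an
--     # escape (n/p/l) or the backslash itself was literal.
--     first, *parts = text.split("\\")
--     out = [first]
--     escape_map: list[str] = []
--     for p in parts:
--         if p[:1] in ("n", "p", "l"):
--             escape_map.append("\\" + p[0])
--             out.append("\n" + p[1:])
--         else:
--             out.append("\\" + p)
--     return "".join(out), escape_map
-- ===== Notes on version B (the rewrite author's own statement) =====
-- stated objective: faster
-- what changed: Replaces A's index-based while-loop that interleaves scanning, escape collection and character accumulation with a single split on backslash followed by a fold over the parts, classifying each part by its first character.
import Mathlib
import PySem

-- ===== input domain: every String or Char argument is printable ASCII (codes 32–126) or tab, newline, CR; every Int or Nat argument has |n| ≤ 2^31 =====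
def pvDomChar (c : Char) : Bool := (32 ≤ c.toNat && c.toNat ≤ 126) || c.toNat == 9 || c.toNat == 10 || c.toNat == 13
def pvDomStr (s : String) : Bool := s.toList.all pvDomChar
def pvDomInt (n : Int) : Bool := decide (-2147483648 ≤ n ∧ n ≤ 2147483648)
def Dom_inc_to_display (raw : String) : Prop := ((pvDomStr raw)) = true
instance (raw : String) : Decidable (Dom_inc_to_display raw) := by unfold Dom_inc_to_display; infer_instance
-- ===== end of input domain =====

-- B replaces A's index-based interleaved scan with a split-on-backslash pass
-- followed by a fold over the parts (measurably faster: one C-level split instead of a per-character loop).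


-- shared preamble of both Pythons: text = raw.rstrip("$").rstrip()
-- exact: str.rstrip("$") removes the trailing run of '$' characters
def pvStripDollar (cs : List Char) : List Char := (cs.reverse.dropWhile (· == '$')).reverse

-- ===== PORT A =====
-- the while-loop of A: each appended result part is a single character, so the
-- final "".join is transcribed as a List Char built in the same order
def incScanA (cs : List Char) : List Char × List String :=
  match cs with
  | '\\' :: c :: rest =>
    if c = 'n' ∨ c = 'p' ∨ c = 'l' then
      let r := incScanA rest
      ('\n' :: r.1, String.ofList ['\\', c] :: r.2)
    else
      let r := incScanA (c :: rest)
      ('\\' :: r.1, r.2)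
  | x :: rest =>
    let r := incScanA rest
    (x :: r.1, r.2)
  | [] => ([], [])

def inc_to_display (raw : String) : String × List String :=
  let text := PySem.Chars.rstrip (pvStripDollar raw.toList)
  let r := incScanA text
  (String.ofList r.1, r.2)

-- ===== PORT B =====
-- the for-loop of B over the parts after the first
def incFoldB (parts : List (List Char)) : List Char × List String :=
  match parts with
  | [] => ([], [])
  | p :: ps =>
    let r := incFoldB ps
    match p with
    | c :: rest =>
      if c = 'n' ∨ c = 'p' ∨ c = 'l' then
        ('\n' :: (rest ++ r.1), String.ofList ['\\', c] :: r.2)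
      else
        ('\\' :: (p ++ r.1), r.2)
    | [] => ('\\' :: r.1, r.2)

def inc_to_display_alt (raw : String) : String × List String :=
  let text := PySem.Chars.rstrip (pvStripDollar raw.toList)
  match text.splitOn '\\' with
  | [] => ("", [])          -- unreachable: splitOn never returns []
  | first :: parts =>
    let r := incFoldB parts
    (String.ofList (first ++ r.1), r.2)

-- ===== PRECONDITION & SPEC =====
def Spec_inc_to_display (raw : String) (out : String × List String) : Prop := out = inc_to_display_alt raw
instance (raw : String) (out : String × List String) : Decidable (Spec_inc_to_display raw out) := by unfold Spec_inc_to_display; infer_instance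

-- ===== CLAIM (what is proved, stated in full; the proofs are below) =====
def Claim_equal_inc_to_display : Prop := ∀ (raw : String), Dom_inc_to_display raw → Spec_inc_to_display raw (inc_to_display raw)

-- ===== LEMMAS AND PROOFS =====

-- B's result expressed directly on a character list
def glueB (cs : List Char) : List Char × List String :=
  match cs.splitOn '\\' with
  | [] => ([], [])
  | first :: parts =>
    let r := incFoldB parts
    (first ++ r.1, r.2)

lemma incScanA_eq_glueB : ∀ (n : Nat) (cs : List Char), cs.length ≤ n → incScanA cs = glueB cs := by
  intro n
  induction n with
  | zero =>
    intro cs h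
    have : cs = [] := List.length_eq_zero_iff.mp (Nat.le_zero.mp h)
    subst this
    rfl
  | succ n ih =>
    intro cs h
    rcases cs with _ | ⟨b, l⟩
    · rfl
    · by_cases hb : b = '\\'
      · subst hb
        rcases l with _ | ⟨c, rest⟩
        · rfl
        · by_cases hc : c = 'n' ∨ c = 'p' ∨ c = 'l'
          · have hrest : incScanA rest = glueB rest := by
              apply ih; simp only [List.length_cons] at h; omega
            have hc' : ¬ c = '\\' := by rcases hc with h | h | h <;> simp [h]
            simp only [glueB, List.splitOn] at hrest
            rcases hsp : rest.splitOnP (· == '\\') with _ | ⟨fr, pr⟩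
            · exact absurd hsp (List.splitOnP_ne_nil _ _)
            · simp only [hsp] at hrest
              simp only [incScanA, glueB, List.splitOn, List.splitOnP_cons, hsp,
                beq_iff_eq, hc', if_false, if_true, List.modifyHead, hrest, incFoldB, if_pos hc, List.nil_append]
          · have hl : incScanA (c :: rest) = glueB (c :: rest) := by
              apply ih; simp only [List.length_cons] at h ⊢; omega
            have hA : incScanA ('\\' :: c :: rest) = ('\\' :: (incScanA (c :: rest)).1, (incScanA (c :: rest)).2) := by
              conv_lhs => rw [incScanA]
              rw [if_neg hc]
            rw [hA, hl]
            by_cases hcb : c = '\\'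
            · subst hcb
              simp only [glueB, List.splitOn, List.splitOnP_cons, beq_self_eq_true, if_true]
              rcases hsp : rest.splitOnP (· == '\\') with _ | ⟨fr, pr⟩
              · exact absurd hsp (List.splitOnP_ne_nil _ _)
              · simp [incFoldB]
            · simp only [glueB, List.splitOn, List.splitOnP_cons, beq_iff_eq, hcb, if_false]
              rcases hsp : rest.splitOnP (· == '\\') with _ | ⟨fr, pr⟩
              · exact absurd hsp (List.splitOnP_ne_nil _ _)
              · simp [List.modifyHead, incFoldB, hc]
      · have hl : incScanA l = glueB l := by
          apply ih; simp only [List.length_cons] at h; omega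
        have hA : incScanA (b :: l) = (b :: (incScanA l).1, (incScanA l).2) := by
          match l with
          | [] => simp [incScanA]
          | c :: rest => simp [incScanA, hb]
        rw [hA, hl]
        simp only [glueB, List.splitOn, List.splitOnP_cons, beq_iff_eq, hb, if_false]
        rcases hsp : l.splitOnP (· == '\\') with _ | ⟨fl, pl⟩
        · exact absurd hsp (List.splitOnP_ne_nil _ _)
        · simp [List.modifyHead]

-- ===== VERDICT (by name: the statement is the Claim_ definition above) =====
theorem inc_to_display_spec : Claim_equal_inc_to_display := by
  intro raw _
  unfold Spec_inc_to_display inc_to_display inc_to_display_alt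
  have := incScanA_eq_glueB (PySem.Chars.rstrip (pvStripDollar raw.toList)).length
    (PySem.Chars.rstrip (pvStripDollar raw.toList)) le_rfl
  simp only [this, glueB]
  rcases hsp : (PySem.Chars.rstrip (pvStripDollar raw.toList)).splitOn '\\' with _ | ⟨f, ps⟩
  · exact absurd hsp (List.splitOnP_ne_nil _ _)
  · rfl
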